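-- pv_equiv track=rewrite | github.com/mardin200/Threes-Game | Threes_game.py | insert_new_item
-- ===== SOURCE A (Python) =====
-- import copy
--
-- def number_of_empty_cells(M,n,move):
--     count=0
--     if move=='U':
--         for i in range(n):
--             if(M[n-1][i]==0):
--                 count+=1
--     elif move=='D':
--         for i in range(n):
--             if(M[0][i]==0):
--                 count+=1
--     elif move=='R':
--         for i in range(n):
--             if(M[i][0]==0):
--                 count+=1
--     elif move=='L':
--         for i in range(n):
--             if(M[i][n-1]==0):
--                 count+=1
--     return count
--
-- def insert_new_item(state,n,item,move):
--     M=copy.deepcopy(state)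
--     m=number_of_empty_cells(M,n,move)
--     if m==0:
--         return M
--     if move=='U':
--         k=0
--         for i in range(n):
--             if(M[n-1][i]==0):
--                 if((item[0]%m)==k):
--                     M[n-1][i]=item[1]
--                     return M
--                 else:
--                     k+=1
--
--     elif move=='D':
--         k=0
--         for i in range(n):
--             if(M[0][i]==0):
--                 if((item[0]%m)==k):
--                     M[0][i]=item[1]
--                     return M
--                 else:
--                     k+=1
--     elif move=='R':
--         k=0
--         for i in range(n):
--             if(M[i][0]==0):
--                 if((item[0]%m)==k):
--                     M[i][0]=item[1]
--                     return M
--                 else: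
--                     k+=1
--     elif move=='L':
--         k=0
--         for i in range(n):
--             if(M[i][n-1]==0):
--                 if((item[0]%m)==k):
--                     M[i][n-1]=item[1]
--                     return M
--                 else:
--                     k+=1
-- ===== SOURCE B (Python) =====
-- import copy
--
-- def insert_new_item(state, n, item, move):
--     M = copy.deepcopy(state)
--     if move == 'U':
--         cells = [(n - 1, j) for j in range(n)]
--     elif move == 'D':
--         cells = [(0, j) for j in range(n)]
--     elif move == 'R':
--         cells = [(i, 0) for i in range(n)]
--     elif move == 'L':
--         cells = [(i, n - 1) for i in range(n)]
--     else:
--         cells = []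
--     empties = [(r, c) for (r, c) in cells if M[r][c] == 0]
--     if not empties:
--         return M
--     r, c = empties[item[0] % len(empties)]
--     M[r][c] = item[1]
--     return M
-- ===== Notes on version B (the rewrite author's own statement) =====
-- stated objective: simpler
-- what changed: B builds the chosen edge's coordinate list once, filters it to the empty cells in a single pass and writes directly at empties[item[0] % len(empties)], replacing A's separate count helper plus four duplicated running-counter re-scan loops.
import Mathlib
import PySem

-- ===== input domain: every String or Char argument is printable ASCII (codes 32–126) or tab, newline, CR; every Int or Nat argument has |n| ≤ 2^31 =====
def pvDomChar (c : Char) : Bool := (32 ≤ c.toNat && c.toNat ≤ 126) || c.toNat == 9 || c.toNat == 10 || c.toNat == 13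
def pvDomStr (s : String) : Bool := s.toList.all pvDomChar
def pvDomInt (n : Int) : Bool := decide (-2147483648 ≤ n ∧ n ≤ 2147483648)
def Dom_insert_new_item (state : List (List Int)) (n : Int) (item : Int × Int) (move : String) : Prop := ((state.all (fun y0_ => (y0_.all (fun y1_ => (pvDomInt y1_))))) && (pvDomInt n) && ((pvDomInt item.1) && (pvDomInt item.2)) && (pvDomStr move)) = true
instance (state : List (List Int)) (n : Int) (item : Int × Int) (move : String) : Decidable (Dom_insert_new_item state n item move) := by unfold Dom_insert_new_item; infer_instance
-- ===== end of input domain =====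

-- B replaces A's count pass plus four duplicated counter re-scan loops by one filtered
-- coordinate list indexed directly (objective: simpler). Return-value equivalence only:
-- the Python A mutates (a deep copy of) its input, never the caller's list.

-- ===== PORT A =====
-- M[r][c]: exact under Pre_ (both indices nonnegative and in range); default 1 is
-- never read inside Pre_ (Python raises IndexError there).
def pvCell (M : List (List Int)) (r c : Int) : Int :=
  ((PySem.List.pyGet? M r).bind (fun row => PySem.List.pyGet? row c)).getD 1

-- M[r][c] = v: exact for nonnegative in-range indices (the only ones reached inside Pre_)
def pvSet (M : List (List Int)) (r c v : Int) : List (List Int) :=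
  M.set r.toNat ((M.getD r.toNat []).set c.toNat v)

-- number_of_empty_cells: same if/elif chain, each branch 'for i in range(n): if cell==0: count+=1'
def number_of_empty_cells (M : List (List Int)) (n : Int) (move : String) : Int :=
  if move = "U" then
    (PySem.List.pyRange 0 n 1).foldl (fun c i => if pvCell M (n-1) i == 0 then c + 1 else c) 0
  else if move = "D" then
    (PySem.List.pyRange 0 n 1).foldl (fun c i => if pvCell M 0 i == 0 then c + 1 else c) 0
  else if move = "R" then
    (PySem.List.pyRange 0 n 1).foldl (fun c i => if pvCell M i 0 == 0 then c + 1 else c) 0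
  else if move = "L" then
    (PySem.List.pyRange 0 n 1).foldl (fun c i => if pvCell M i (n-1) == 0 then c + 1 else c) 0
  else 0

-- the per-branch loop of A: 'k=0; for i in range(n): if cell(pos i)==0: if t==k: set; return else k+=1';
-- Python's fall-through (None, unreachable inside Pre_ when m>0) is ported as returning M
def pvScanA (M : List (List Int)) (pos : Int → Int × Int) (t v : Int) :
    List Int → Int → List (List Int)
  | [], _ => M
  | i :: rest, k =>
      if pvCell M (pos i).1 (pos i).2 == 0 then
        if t == k then pvSet M (pos i).1 (pos i).2 v
        else pvScanA M pos t v rest (k + 1)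
      else pvScanA M pos t v rest k

def insert_new_item (state : List (List Int)) (n : Int) (item : Int × Int) (move : String) : List (List Int) :=
  let M := state
  let m := number_of_empty_cells M n move
  if m == 0 then M
  else if move = "U" then
    pvScanA M (fun i => (n-1, i)) (PySem.Int.mod item.1 m) item.2 (PySem.List.pyRange 0 n 1) 0
  else if move = "D" then
    pvScanA M (fun i => (0, i)) (PySem.Int.mod item.1 m) item.2 (PySem.List.pyRange 0 n 1) 0
  else if move = "R" then
    pvScanA M (fun i => (i, 0)) (PySem.Int.mod item.1 m) item.2 (PySem.List.pyRange 0 n 1) 0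
  else if move = "L" then
    pvScanA M (fun i => (i, n-1)) (PySem.Int.mod item.1 m) item.2 (PySem.List.pyRange 0 n 1) 0
  else M

-- ===== PORT B =====
def insert_new_item_alt (state : List (List Int)) (n : Int) (item : Int × Int) (move : String) : List (List Int) :=
  let M := state
  let cells : List (Int × Int) :=
    if move = "U" then (PySem.List.pyRange 0 n 1).map (fun j => (n-1, j))
    else if move = "D" then (PySem.List.pyRange 0 n 1).map (fun j => ((0 : Int), j))
    else if move = "R" then (PySem.List.pyRange 0 n 1).map (fun i => (i, (0 : Int)))
    else if move = "L" then (PySem.List.pyRange 0 n 1).map (fun i => (i, n-1))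
    else []
  let empties := cells.filter (fun rc => pvCell M rc.1 rc.2 == 0)
  if empties.isEmpty then M
  else
    -- empties[item[0] % len(empties)]: the index is in [0, len) so pyGet? is some; default never read
    let rc := (PySem.List.pyGet? empties (PySem.Int.mod item.1 (empties.length : Int))).getD (0, 0)
    pvSet M rc.1 rc.2 item.2

-- ===== PRECONDITION & SPEC =====
-- Pre_ excludes exactly the inputs on which the Python A raises IndexError: a valid move with
-- 0 < n whose edge cells M[...] are not all in range (A's counting pass already touches them all).
def Pre_insert_new_item (state : List (List Int)) (n : Int) (_item : Int × Int) (move : String) : Prop :=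
  0 < n →
    (move = "U" → n ≤ (state.length : Int) ∧ n ≤ ((state.getD (n-1).toNat []).length : Int)) ∧
    (move = "D" → 0 < state.length ∧ n ≤ ((state.getD 0 []).length : Int)) ∧
    (move = "R" → n ≤ (state.length : Int) ∧ ∀ row ∈ state.take n.toNat, 0 < row.length) ∧
    (move = "L" → n ≤ (state.length : Int) ∧ ∀ row ∈ state.take n.toNat, n ≤ (row.length : Int))
instance (state : List (List Int)) (n : Int) (item : Int × Int) (move : String) : Decidable (Pre_insert_new_item state n item move) := by unfold Pre_insert_new_item; infer_instance

def pvWitness_insert_new_item : List (List Int) × Int × (Int × Int) × String :=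
  ([[1, 0], [0, 2]], 2, (3, 1), "U")

def Spec_insert_new_item (state : List (List Int)) (n : Int) (item : Int × Int) (move : String) (out : List (List Int)) : Prop := out = insert_new_item_alt state n item move
instance (state : List (List Int)) (n : Int) (item : Int × Int) (move : String) (out : List (List Int)) : Decidable (Spec_insert_new_item state n item move out) := by unfold Spec_insert_new_item; infer_instance

-- ===== CLAIM (what is proved, stated in full; the proofs are below) =====
def Claim_equal_insert_new_item : Prop := ∀ (state : List (List Int)) (n : Int) (item : Int × Int) (move : String), Dom_insert_new_item state n item move → Pre_insert_new_item state n item move → Spec_insert_new_item state n item move (insert_new_item state n item move)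

-- ===== LEMMAS AND PROOFS =====

-- A's counting fold is the length of the filtered index list
theorem pv_count_eq_filter (M : List (List Int)) (pos : Int → Int × Int) (l : List Int) (c0 : Int) :
    l.foldl (fun c i => if pvCell M (pos i).1 (pos i).2 == 0 then c + 1 else c) c0
      = c0 + ((l.filter (fun i => pvCell M (pos i).1 (pos i).2 == 0)).length : Int) := by
  induction l generalizing c0 with
  | nil => simp
  | cons i rest ih =>
      by_cases h : (pvCell M (pos i).1 (pos i).2 == 0) = true
      · rw [List.foldl_cons, if_pos h, ih, List.filter_cons]
        simp [h]
        omega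
      · rw [List.foldl_cons, if_neg h, ih, List.filter_cons]
        simp [h]

-- A's counter scan hits exactly the (t-k)-th element of the filtered index list
theorem pv_scan_eq (M : List (List Int)) (pos : Int → Int × Int) (t v : Int) (l : List Int) (k : Int)
    (hk : 0 ≤ t - k)
    (hlt : t - k < ((l.filter (fun i => pvCell M (pos i).1 (pos i).2 == 0)).length : Int)) :
    pvScanA M pos t v l k
      = pvSet M (pos ((l.filter (fun i => pvCell M (pos i).1 (pos i).2 == 0)).getD (t-k).toNat 0)).1
               (pos ((l.filter (fun i => pvCell M (pos i).1 (pos i).2 == 0)).getD (t-k).toNat 0)).2 v := by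
  induction l generalizing k with
  | nil => simp at hlt; omega
  | cons i rest ih =>
      by_cases h : (pvCell M (pos i).1 (pos i).2 == 0) = true
      · by_cases ht : t = k
        · simp [pvScanA, h, ht]
        · have hbk : (t == k) = false := by simp [ht]
          have h1 : 0 ≤ t - (k + 1) := by omega
          have hfil : ((i :: rest).filter (fun i => pvCell M (pos i).1 (pos i).2 == 0))
              = i :: rest.filter (fun i => pvCell M (pos i).1 (pos i).2 == 0) :=
            List.filter_cons_of_pos h
          have h2 : t - (k + 1) < ((rest.filter (fun i => pvCell M (pos i).1 (pos i).2 == 0)).length : Int) := by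
            rw [hfil] at hlt; simp at hlt; omega
          have hnat : (t - k).toNat = (t - (k+1)).toNat + 1 := by omega
          simp only [pvScanA, h, hbk, if_true, if_false, Bool.false_eq_true]
          rw [ih (k + 1) h1 h2, hfil, hnat]
          simp
      · have hfil : ((i :: rest).filter (fun i => pvCell M (pos i).1 (pos i).2 == 0))
            = rest.filter (fun i => pvCell M (pos i).1 (pos i).2 == 0) :=
          List.filter_cons_of_neg h
        rw [hfil] at hlt
        simp only [pvScanA, h, if_false, Bool.false_eq_true]
        rw [ih k hk hlt, hfil]

-- filtering the mapped coordinate list = mapping the filtered index list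
theorem pv_filter_map (M : List (List Int)) (pos : Int → Int × Int) (l : List Int) :
    ((l.map pos).filter (fun rc => pvCell M rc.1 rc.2 == 0))
      = (l.filter (fun i => pvCell M (pos i).1 (pos i).2 == 0)).map pos := by
  induction l with
  | nil => rfl
  | cons i rest ih =>
      by_cases h : (pvCell M (pos i).1 (pos i).2 == 0) = true
      · simp [h, ih]
      · simp [h, ih]

-- one full branch: A's 'if m==0 then M else count+scan' = B's 'filter then if empty then M else index'
theorem pv_full_branch (M : List (List Int)) (pos : Int → Int × Int) (t0 v : Int) (l : List Int) :
    (if ((l.foldl (fun c i => if pvCell M (pos i).1 (pos i).2 == 0 then c + 1 else c) (0 : Int)) == 0) = true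
     then M
     else pvScanA M pos
       (PySem.Int.mod t0 (l.foldl (fun c i => if pvCell M (pos i).1 (pos i).2 == 0 then c + 1 else c) (0 : Int)))
       v l 0)
    = (let empties := (l.map pos).filter (fun rc => pvCell M rc.1 rc.2 == 0)
       if empties.isEmpty then M
       else
         let rc := (PySem.List.pyGet? empties (PySem.Int.mod t0 (empties.length : Int))).getD (0, 0)
         pvSet M rc.1 rc.2 v) := by
  have hcnt : (l.foldl (fun c i => if pvCell M (pos i).1 (pos i).2 == 0 then c + 1 else c) (0 : Int))
      = (((l.filter (fun i => pvCell M (pos i).1 (pos i).2 == 0)).length : Nat) : Int) := by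
    rw [pv_count_eq_filter]; ring
  have hmapfil := pv_filter_map M pos l
  rw [hcnt, hmapfil]
  set fl := l.filter (fun i => pvCell M (pos i).1 (pos i).2 == 0) with hfl
  by_cases h0 : fl.length = 0
  · have hfe : fl = [] := List.eq_nil_of_length_eq_zero h0
    rw [hfe]; simp
  · have hpos : (0 : Int) < (fl.length : Int) := by
      exact_mod_cast Nat.pos_of_ne_zero h0
    have hA : ¬ (((fl.length : Nat) : Int) == 0) = true := by
      simpa using h0
    have hB : ¬ (fl.map pos).isEmpty = true := by
      simp [List.isEmpty_iff]
      intro h; exact h0 (by simp [h])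
    rw [if_neg hA]
    simp only []
    rw [if_neg hB, List.length_map]
    set t := PySem.Int.mod t0 ((fl.length : Nat) : Int) with hT
    have ht0 : 0 ≤ t := PySem.Int.mod_nonneg t0 hpos
    have htlt : t < (fl.length : Int) := PySem.Int.mod_lt t0 hpos
    have htn : t.toNat < fl.length := by omega
    rw [pv_scan_eq M pos t v l 0 (by omega) (by rw [← hfl]; simpa using htlt), ← hfl]
    have hgd : fl.getD (t - 0).toNat 0 = fl[t.toNat] := by
      have : (t - 0).toNat = t.toNat := by omega
      rw [this]
      simp [List.getD, List.getElem?_eq_getElem htn]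
    have hget : PySem.List.pyGet? (fl.map pos) t = some (pos fl[t.toNat]) := by
      conv_lhs => rw [show t = ((t.toNat : Nat) : Int) by omega]
      rw [PySem.List.pyGet?_natCast]
      simp [List.getElem?_eq_getElem htn]
    rw [hgd, hget]
    simp

-- ===== VERDICT (by name: the statement is the Claim_ definition above) =====
theorem insert_new_item_spec : Claim_equal_insert_new_item := by
  intro state n item move _hDom _hPre
  unfold Spec_insert_new_item insert_new_item insert_new_item_alt number_of_empty_cells
  by_cases hU : move = "U"
  · subst hU; simp only [String.reduceEq, reduceIte]
    have hfb := pv_full_branch state (fun i => ((n-1 : Int), i)) item.1 item.2 (PySem.List.pyRange 0 n 1)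
    simp only [] at hfb
    exact hfb
  · by_cases hD : move = "D"
    · subst hD; simp only [String.reduceEq, reduceIte]
      have hfb := pv_full_branch state (fun i => ((0 : Int), i)) item.1 item.2 (PySem.List.pyRange 0 n 1)
      simp only [] at hfb
      exact hfb
    · by_cases hR : move = "R"
      · subst hR; simp only [String.reduceEq, reduceIte]
        have hfb := pv_full_branch state (fun i => (i, (0 : Int))) item.1 item.2 (PySem.List.pyRange 0 n 1)
        simp only [] at hfb
        exact hfb
      · by_cases hL : move = "L"
        · subst hL; simp only [String.reduceEq, reduceIte]
          have hfb := pv_full_branch state (fun i => (i, (n-1 : Int))) item.1 item.2 (PySem.List.pyRange 0 n 1)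
          simp only [] at hfb
          exact hfb
        · simp only [if_neg hU, if_neg hD, if_neg hR, if_neg hL]
          simp
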